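-- pv_equiv track=rewrite | github.com/volcengine/verl | atropos/environments/intern_bootcamp/internbootcamp_lib/internbootcamp/bootcamp/e1convergingarrayeasyversion/e1convergingarrayeasyversion.py | _check_0
-- ===== SOURCE A (Python) =====
-- def _check_0(x, n, b):
--     d = s = 0
--     for i in range(n):
--         if i > 0:
--             d += b[i-1]
--             s += d
--         if x*(i+1) + s > 0:
--             return False
--     return True
-- ===== SOURCE B (Python) =====
-- def _check_0(x, n, b):
--     # Second-order prefix sums of b, built once: P2[k] = sum_{m<=k} sum_{j<=m} b[j].
--     # The accumulated weighted sum after i steps is then simply P2[i-1].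
--     P2 = []
--     t = u = 0
--     for v in b:
--         t += v
--         u += t
--         P2.append(u)
--     for i in range(n):
--         s = P2[i - 1] if i > 0 else 0
--         if x * (i + 1) + s > 0:
--             return False
--     return True
-- ===== Notes on version B (the rewrite author's own statement) =====
-- stated objective: alternative
-- what changed: B precomputes the second-order prefix sums of b in one pass over the list and then runs a stateless check loop reading s_i = P2[i-1], instead of A's single fused loop that incrementally maintains the running sum d and accumulated sum s.
import Mathlib
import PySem

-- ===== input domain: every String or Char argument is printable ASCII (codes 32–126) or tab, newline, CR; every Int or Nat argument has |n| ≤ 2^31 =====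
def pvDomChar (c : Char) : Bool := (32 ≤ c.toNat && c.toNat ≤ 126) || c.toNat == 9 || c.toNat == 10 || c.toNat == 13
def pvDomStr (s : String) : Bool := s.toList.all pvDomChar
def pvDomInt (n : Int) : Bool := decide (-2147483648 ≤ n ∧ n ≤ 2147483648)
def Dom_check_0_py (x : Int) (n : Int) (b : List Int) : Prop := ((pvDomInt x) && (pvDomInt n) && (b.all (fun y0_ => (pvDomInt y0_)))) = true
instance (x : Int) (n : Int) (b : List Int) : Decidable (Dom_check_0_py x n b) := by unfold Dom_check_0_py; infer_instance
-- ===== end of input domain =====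

-- B replaces A's fused incremental (d, s) loop by a one-pass precomputation of the
-- second-order prefix sums of b followed by a stateless check loop; objective: alternative.


-- ===== PORT A =====
-- loop 'for i in range(n)' with state (d, s); b[i-1] is in range on every reached
-- iteration of every input admitted by Pre_, so pyGetD's default is never used there
def check0Loop (x : Int) (b : List Int) (n : Nat) (i : Nat) (d s : Int) : Bool :=
  if i < n then
    let d' := if 0 < i then d + PySem.List.pyGetD b ((i : Int) - 1) 0 else d
    let s' := if 0 < i then s + d' else s
    if x * ((i : Int) + 1) + s' > 0 then false
    else check0Loop x b n (i + 1) d' s'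
  else true
  termination_by n - i

def check_0_py (x : Int) (n : Int) (b : List Int) : Bool :=
  check0Loop x b n.toNat 0 0 0

-- ===== PORT B =====
-- first pass of Source B: builds P2, the list of second-order prefix sums of b
def buildP2 (b : List Int) (t u : Int) : List Int :=
  match b with
  | [] => []
  | v :: rest => (u + (t + v)) :: buildP2 rest (t + v) (u + (t + v))

-- second loop of Source B: 'for i in range(n)' reading s from P2
def altLoop (x : Int) (P2 : List Int) (n : Nat) (i : Nat) : Bool :=
  if i < n then
    let s := if 0 < i then PySem.List.pyGetD P2 ((i : Int) - 1) 0 else 0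
    if x * ((i : Int) + 1) + s > 0 then false
    else altLoop x P2 n (i + 1)
  else true
  termination_by n - i

def check_0_py_alt (x : Int) (n : Int) (b : List Int) : Bool :=
  altLoop x (buildP2 b 0 0) n.toNat 0

-- ===== PRECONDITION & SPEC =====
-- the accumulated weighted sum after i loop steps, as a closed double sum
def preS (b : List Int) (i : Nat) : Int :=
  ∑ m ∈ Finset.range i, ∑ j ∈ Finset.range (m + 1), b.getD j 0

-- Pre_ excludes exactly the inputs where Python A raises IndexError: n exceeds
-- len(b)+1 and no early False-return fires within the first len(b)+1 iterations
-- (B raises on exactly the same inputs).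
def Pre_check_0_py (x : Int) (n : Int) (b : List Int) : Prop :=
  n ≤ (b.length : Int) + 1 ∨
    ∃ i < b.length + 1, x * ((i : Int) + 1) + preS b i > 0
instance (x : Int) (n : Int) (b : List Int) : Decidable (Pre_check_0_py x n b) := by
  unfold Pre_check_0_py; infer_instance

def pvWitness_check_0_py : Int × Int × List Int := (-1, 3, [1, -2])

def Spec_check_0_py (x : Int) (n : Int) (b : List Int) (out : Bool) : Prop := out = check_0_py_alt x n b
instance (x : Int) (n : Int) (b : List Int) (out : Bool) : Decidable (Spec_check_0_py x n b out) := by unfold Spec_check_0_py; infer_instance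

-- ===== CLAIM (what is proved, stated in full; the proofs are below) =====
def Claim_equal_check_0_py : Prop := ∀ (x : Int) (n : Int) (b : List Int), Dom_check_0_py x n b → Pre_check_0_py x n b → Spec_check_0_py x n b (check_0_py x n b)

-- ===== LEMMAS AND PROOFS =====

-- first-order prefix sum: the value of A's variable d after i loop steps
def preD (b : List Int) (i : Nat) : Int := ∑ j ∈ Finset.range i, b.getD j 0

lemma preS_succ (b : List Int) (i : Nat) :
    preS b (i + 1) = preS b i + preD b (i + 1) := by
  simp [preS, preD, Finset.sum_range_succ]

lemma preD_succ (b : List Int) (i : Nat) :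
    preD b (i + 1) = preD b i + b.getD i 0 := by
  simp [preD, Finset.sum_range_succ]

lemma buildP2_getD (b : List Int) (t u : Int) (k : Nat) (hk : k < b.length) :
    (buildP2 b t u).getD k 0
      = u + ∑ m ∈ Finset.range (k + 1), (t + ∑ j ∈ Finset.range (m + 1), b.getD j 0) := by
  induction b generalizing t u k with
  | nil => simp at hk
  | cons v rest ih =>
    cases k with
    | zero => simp [buildP2]
    | succ k =>
      have hk' : k < rest.length := by simpa using hk
      have step : ∀ m : Nat,
          ∑ j ∈ Finset.range (m + 1 + 1), (v :: rest).getD j 0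
            = v + ∑ j ∈ Finset.range (m + 1), rest.getD j 0 := by
        intro m
        rw [Finset.sum_range_succ']
        simp
        ring
      calc (buildP2 (v :: rest) t u).getD (k + 1) 0
          = (buildP2 rest (t + v) (u + (t + v))).getD k 0 := by simp [buildP2]
        _ = (u + (t + v)) + ∑ m ∈ Finset.range (k + 1),
              ((t + v) + ∑ j ∈ Finset.range (m + 1), rest.getD j 0) := ih (t + v) (u + (t + v)) k hk'
        _ = u + ∑ m ∈ Finset.range (k + 1 + 1),
              (t + ∑ j ∈ Finset.range (m + 1), (v :: rest).getD j 0) := by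
            conv_rhs => rw [Finset.sum_range_succ']
            have : ∀ m ∈ Finset.range (k + 1),
                (t + ∑ j ∈ Finset.range (m + 1 + 1), (v :: rest).getD j 0)
                  = ((t + v) + ∑ j ∈ Finset.range (m + 1), rest.getD j 0) := by
              intro m _; rw [step m]; ring
            rw [Finset.sum_congr rfl this]
            simp
            ring

-- P2[k] is exactly the accumulated weighted sum preS (k+1)
lemma P2_spec (b : List Int) (k : Nat) (hk : k < b.length) :
    (buildP2 b 0 0).getD k 0 = preS b (k + 1) := by
  rw [buildP2_getD b 0 0 k hk]
  simp [preS]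

-- main invariant: entering iteration i with d = preD (i-1), s = preS (i-1),
-- both loops agree, provided no earlier check fired and Pre_ holds
lemma loop_eq (x : Int) (b : List Int) (n : Nat)
    (hpre : n ≤ b.length + 1 ∨ ∃ i < b.length + 1, x * ((i : Int) + 1) + preS b i > 0) :
    ∀ (k i : Nat), n - i ≤ k → i ≤ b.length + 1 →
      (∀ i' < i, ¬ (x * ((i' : Int) + 1) + preS b i' > 0)) →
      check0Loop x b n i (preD b (i - 1)) (preS b (i - 1)) = altLoop x (buildP2 b 0 0) n i := by
  intro k
  induction k with
  | zero =>
    intro i hk _ _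
    have hin : ¬ i < n := by omega
    rw [check0Loop, altLoop]
    simp [hin]
  | succ k ih =>
    intro i hk hi hprev
    by_cases hin : i < n
    · -- main case: iteration i runs
      by_cases hib : i ≤ b.length
      · -- accesses in range
        have hs' : (if 0 < i then preS b (i - 1) + preD b i else preS b (i - 1)) = preS b i := by
          by_cases h0 : 0 < i
          · rw [if_pos h0]
            have : i = (i - 1) + 1 := by omega
            rw [this, preS_succ]
            simp
          · have : i = 0 := by omega
            simp [this]
        have hd' : (if 0 < i then preD b (i - 1) + PySem.List.pyGetD b ((i : Int) - 1) 0 else preD b (i - 1)) = preD b i := by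
          by_cases h0 : 0 < i
          · have hi1 : (i : Int) - 1 = ((i - 1 : Nat) : Int) := by omega
            rw [if_pos h0, hi1, PySem.List.pyGetD_natCast]
            have : i = (i - 1) + 1 := by omega
            rw [this, preD_succ]
            simp
          · have : i = 0 := by omega
            simp [this, preD]
        have hsB : (if 0 < i then PySem.List.pyGetD (buildP2 b 0 0) ((i : Int) - 1) 0 else 0) = preS b i := by
          by_cases h0 : 0 < i
          · have hi1 : (i : Int) - 1 = ((i - 1 : Nat) : Int) := by omega
            rw [if_pos h0, hi1, PySem.List.pyGetD_natCast]
            have hk' : i - 1 < b.length := by omega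
            rw [P2_spec b (i - 1) hk']
            congr 1
            omega
          · have : i = 0 := by omega
            simp [this, preS]
        rw [check0Loop, altLoop, if_pos hin, if_pos hin]
        simp only [hd', hs', hsB]
        by_cases hchk : x * ((i : Int) + 1) + preS b i > 0
        · simp [hchk]
        · rw [if_neg hchk, if_neg hchk]
          have hrec := ih (i + 1) (by omega) (by omega) (by
            intro i' hi'
            by_cases h : i' < i
            · exact hprev i' h
            · have : i' = i := by omega
              rw [this]; exact hchk)
          simpa using hrec
      · -- i = b.length + 1 while i < n: Pre_ forces an earlier check to have fired
        exfalso
        have hieq : i = b.length + 1 := by omega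
        rcases hpre with h1 | ⟨i', hi', hchk⟩
        · omega
        · exact hprev i' (by omega) hchk
    · rw [check0Loop, altLoop]
      simp [hin]

-- ===== VERDICT (by name: the statement is the Claim_ definition above) =====
theorem check_0_py_spec : Claim_equal_check_0_py := by
  intro x n b _ hpre
  unfold Spec_check_0_py check_0_py check_0_py_alt
  have hpre' : n.toNat ≤ b.length + 1 ∨ ∃ i < b.length + 1, x * ((i : Int) + 1) + preS b i > 0 := by
    rcases hpre with h | h
    · left; omega
    · right; exact h
  have h := loop_eq x b n.toNat hpre' n.toNat 0 (by omega) (by omega) (by omega)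
  simpa [preD, preS] using h
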